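-- pv_equiv track=rewrite | github.com/dot-css/car-doge-game | main.py | get_current_lane_index
-- ===== SOURCE A (Python) =====
-- lane_centers = [80, 160, 240, 320]
--
-- def get_current_lane_index(rect_x):
--     """Get the current lane index based on car's x position"""
--     car_center = rect_x + 30
--
--     closest_lane = 0
--     min_distance = abs(car_center - lane_centers[0])
--
--     for i, lane_center in enumerate(lane_centers):
--         distance = abs(car_center - lane_center)
--         if distance < min_distance:
--             min_distance = distance
--             closest_lane = i
--
--     return closest_lane
-- ===== SOURCE B (Python) =====
-- def get_current_lane_index(rect_x):
--     # Lane centers are 80,160,240,320 (spacing 80); nearest with ties to the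
--     # lower index is half-to-lower rounding of (car_center-80)/80, clamped.
--     car_center = rect_x + 30
--     return max(0, min(3, (car_center - 41) // 80))
-- ===== Notes on version B (the rewrite author's own statement) =====
-- stated objective: simpler
-- what changed: Replaces the enumerate-scan over the four lane centers with a closed-form half-to-lower rounding (car_center-41)//80 clamped to [0,3]; no loop.
import Mathlib
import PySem

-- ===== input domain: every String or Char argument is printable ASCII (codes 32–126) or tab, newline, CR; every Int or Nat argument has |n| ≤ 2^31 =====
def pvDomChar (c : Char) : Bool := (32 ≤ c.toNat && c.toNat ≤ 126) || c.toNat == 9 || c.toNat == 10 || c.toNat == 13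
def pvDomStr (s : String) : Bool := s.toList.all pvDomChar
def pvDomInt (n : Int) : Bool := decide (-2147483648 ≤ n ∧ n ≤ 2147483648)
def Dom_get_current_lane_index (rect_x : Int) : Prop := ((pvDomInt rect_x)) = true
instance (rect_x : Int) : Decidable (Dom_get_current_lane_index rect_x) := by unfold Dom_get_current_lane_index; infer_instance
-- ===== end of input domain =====

-- ===== PORT A =====
-- B replaces the scan over the four lane centers with a closed-form clamped floor division (simpler, no loop).
def lane_centers : List Int := [80, 160, 240, 320]

-- literal port of A's enumerate loop over lane_centers
def get_current_lane_index (rect_x : Int) : Int :=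
  let car_center := rect_x + 30
  let init : Int × Int := (0, |car_center - 80|)   -- (closest_lane, min_distance); lane_centers[0] = 80
  let r := (PySem.List.enumerate lane_centers).foldl (fun st p =>
    let distance := |car_center - p.2|
    if distance < st.2 then ((p.1 : Int), distance) else st) init
  r.1

-- ===== PORT B =====
def get_current_lane_index_alt (rect_x : Int) : Int :=
  let car_center := rect_x + 30
  max 0 (min 3 (PySem.Int.floordiv (car_center - 41) 80))

-- ===== PRECONDITION & SPEC =====
def Spec_get_current_lane_index (rect_x : Int) (out : Int) : Prop := out = get_current_lane_index_alt rect_x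
instance (rect_x : Int) (out : Int) : Decidable (Spec_get_current_lane_index rect_x out) := by unfold Spec_get_current_lane_index; infer_instance

-- ===== CLAIM (what is proved, stated in full; the proofs are below) =====
def Claim_equal_get_current_lane_index : Prop := ∀ (rect_x : Int), Dom_get_current_lane_index rect_x → Spec_get_current_lane_index rect_x (get_current_lane_index rect_x)

-- ===== LEMMAS AND PROOFS =====

-- ===== VERDICT (by name: the statement is the Claim_ definition above) =====
theorem get_current_lane_index_spec : Claim_equal_get_current_lane_index := by
  intro x _
  unfold Spec_get_current_lane_index get_current_lane_index get_current_lane_index_alt lane_centers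
  simp only [PySem.List.enumerate, List.foldl,
    PySem.Int.floordiv_eq_ediv_of_pos (show (0:Int) < 80 by norm_num), Int.abs_eq_natAbs]
  split_ifs <;> omega
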